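-- pv_equiv track=rewrite | github.com/Lucamatos/codewars | Python/two-joggers.py | nbr_of_laps
-- ===== SOURCE A (Python) =====
-- def nbr_of_laps(x, y):
--     if x > y:
--         maior = x
--     else:
--         maior = y
--     while True:
--         if maior % x == 0 and maior % y == 0:
--             z = maior
--             break
--         else:
--             maior += 1
--     return (z // x, z // y)
-- ===== SOURCE B (Python) =====
-- def nbr_of_laps(x, y):
--     # lcm via Euclid's gcd; each jogger's lap count is lcm divided by their lap length
--     a, b = abs(x), abs(y)
--     while b:
--         a, b = b, a % b
--     lcm = abs(x * y) // a
--     return (lcm // x, lcm // y)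
-- ===== Notes on version B (the rewrite author's own statement) =====
-- stated objective: faster
-- what changed: Replaces A's linear upward scan for a common multiple (up to lcm(x,y) iterations) with Euclid's gcd and the closed-form lcm = |x*y|//gcd.
-- intended difference: When both x and y are negative, A's upward scan stops at the first common multiple at or above max(x,y) - at x itself when x equals y, giving a lap count of one each, and otherwise at zero, giving zero laps each, which is meaningless for the task - while B returns the lcm-based lap counts as on every other input. — e.g. on nbr_of_laps(-2, -3): A returns [0, 0], B returns [-3, -2]
import Mathlib
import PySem

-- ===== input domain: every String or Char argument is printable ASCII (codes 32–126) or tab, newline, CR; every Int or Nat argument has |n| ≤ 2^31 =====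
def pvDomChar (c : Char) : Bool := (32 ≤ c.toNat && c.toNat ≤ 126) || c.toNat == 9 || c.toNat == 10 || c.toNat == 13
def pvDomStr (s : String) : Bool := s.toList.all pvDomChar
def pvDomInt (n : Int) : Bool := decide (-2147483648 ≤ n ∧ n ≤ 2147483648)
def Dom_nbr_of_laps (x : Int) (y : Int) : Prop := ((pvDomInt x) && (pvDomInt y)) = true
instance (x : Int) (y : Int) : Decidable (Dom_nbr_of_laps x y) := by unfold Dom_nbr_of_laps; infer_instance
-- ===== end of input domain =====

-- B replaces A's linear upward scan for a common multiple by Euclid's gcd and the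
-- closed-form lcm = |x*y| // gcd; objective: faster.

-- ===== PORT A =====
-- A's 'while True' search; the fuel only makes the unbounded loop total — on every
-- input satisfying Pre_ and Dom_ the loop stops long before the fuel runs out.
def nbr_of_laps_loop (fuel : Nat) (x y maior : Int) : Int :=
  match fuel with
  | 0 => maior
  | fuel + 1 =>
    if PySem.Int.mod maior x = 0 ∧ PySem.Int.mod maior y = 0 then maior
    else nbr_of_laps_loop fuel x y (maior + 1)

def nbr_of_laps (x : Int) (y : Int) : List Int :=
  let maior : Int := if x > y then x else y
  let z := nbr_of_laps_loop (2 ^ 63) x y maior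
  [PySem.Int.floordiv z x, PySem.Int.floordiv z y]

-- ===== PORT B =====
-- the 'while b: a, b = b, a % b' loop of Source B; the fuel only makes the loop total —
-- Euclid terminates within |b| steps, far below the fuel on every Dom_ input.
def nbr_of_laps_gcd (fuel : Nat) (a b : Int) : Int :=
  match fuel with
  | 0 => a
  | fuel + 1 => if b = 0 then a else nbr_of_laps_gcd fuel b (PySem.Int.mod a b)

def nbr_of_laps_alt (x : Int) (y : Int) : List Int :=
  let g := nbr_of_laps_gcd (2 ^ 63) |x| |y|
  let lcm := PySem.Int.floordiv |x * y| g
  [PySem.Int.floordiv lcm x, PySem.Int.floordiv lcm y]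

-- ===== PRECONDITION & SPEC =====
-- Pre_ excludes exactly x = 0 or y = 0, where Python A raises ZeroDivisionError.
def Pre_nbr_of_laps (x : Int) (y : Int) : Prop := x ≠ 0 ∧ y ≠ 0
instance (x : Int) (y : Int) : Decidable (Pre_nbr_of_laps x y) := by unfold Pre_nbr_of_laps; infer_instance
def pvWitness_nbr_of_laps : Int × Int := (5, 3)

-- When both x and y are negative, A's upward scan stops at the first common multiple
-- at or above max(x,y) — at x itself when x = y, giving a lap count of one each, and
-- otherwise at zero, giving zero laps each, which is meaningless for the task — while
-- B returns the lcm-based lap counts as on every other input.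
def D_nbr_of_laps (x : Int) (y : Int) : Prop := x < 0 ∧ y < 0
instance (x : Int) (y : Int) : Decidable (D_nbr_of_laps x y) := by unfold D_nbr_of_laps; infer_instance

def Spec_nbr_of_laps (x : Int) (y : Int) (out : List Int) : Prop :=
  ¬ D_nbr_of_laps x y → out = nbr_of_laps_alt x y
instance (x : Int) (y : Int) (out : List Int) : Decidable (Spec_nbr_of_laps x y out) := by unfold Spec_nbr_of_laps; infer_instance

def pvDiffWitness_nbr_of_laps : Int × Int := (-2, -3)
def pvDiffWitnessOut_nbr_of_laps : (List Int) × (List Int) := ([0, 0], [-3, -2])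

-- ===== CLAIM (what is proved, stated in full; the proofs are below) =====
def Claim_unchanged_nbr_of_laps : Prop := ∀ (x : Int) (y : Int), Dom_nbr_of_laps x y → Pre_nbr_of_laps x y → Spec_nbr_of_laps x y (nbr_of_laps x y)
def Claim_changed_nbr_of_laps : Prop := Dom_nbr_of_laps (pvDiffWitness_nbr_of_laps.1) (pvDiffWitness_nbr_of_laps.2) ∧ Pre_nbr_of_laps (pvDiffWitness_nbr_of_laps.1) (pvDiffWitness_nbr_of_laps.2) ∧ D_nbr_of_laps (pvDiffWitness_nbr_of_laps.1) (pvDiffWitness_nbr_of_laps.2) ∧ nbr_of_laps (pvDiffWitness_nbr_of_laps.1) (pvDiffWitness_nbr_of_laps.2) = pvDiffWitnessOut_nbr_of_laps.1 ∧ nbr_of_laps_alt (pvDiffWitness_nbr_of_laps.1) (pvDiffWitness_nbr_of_laps.2) = pvDiffWitnessOut_nbr_of_laps.2 ∧ pvDiffWitnessOut_nbr_of_laps.1 ≠ pvDiffWitnessOut_nbr_of_laps.2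
def Claim_exact_nbr_of_laps : Prop := ∀ (x : Int) (y : Int), Dom_nbr_of_laps x y → Pre_nbr_of_laps x y → D_nbr_of_laps x y → nbr_of_laps x y ≠ nbr_of_laps_alt x y

-- ===== LEMMAS AND PROOFS =====

-- A's loop returns the first common multiple t of x and y that is ≥ maior,
-- provided the fuel covers the distance to it.
theorem nbr_of_laps_loop_finds (fuel : Nat) (x y : Int) (t : Int)
    (hx : x ∣ t) (hy : y ∣ t) :
    ∀ m : Int, m ≤ t → (∀ k, m ≤ k → k < t → ¬ (x ∣ k ∧ y ∣ k)) →
      (t - m).toNat ≤ fuel → nbr_of_laps_loop fuel x y m = t := by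
  induction fuel with
  | zero =>
    intro m hmt _ hf
    have : m = t := by omega
    simp [nbr_of_laps_loop, this]
  | succ n ih =>
    intro m hmt hmin hf
    by_cases h : x ∣ m ∧ y ∣ m
    · have hne : ¬ m < t := fun hlt => hmin m le_rfl hlt h
      have heq : m = t := by omega
      rw [nbr_of_laps_loop, if_pos ⟨(PySem.Int.mod_eq_zero_iff_dvd m x).mpr h.1,
        (PySem.Int.mod_eq_zero_iff_dvd m y).mpr h.2⟩]
      exact heq
    · have hne : m ≠ t := by rintro rfl; exact h ⟨hx, hy⟩
      have hcond : ¬ (PySem.Int.mod m x = 0 ∧ PySem.Int.mod m y = 0) := by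
        simpa [PySem.Int.mod_eq_zero_iff_dvd] using h
      rw [nbr_of_laps_loop, if_neg hcond]
      exact ih (m + 1) (by omega) (fun k hk hk' => hmin k (by omega) hk') (by omega)

-- Euclid's loop computes gcd on nonnegative arguments, given enough fuel.
theorem nbr_of_laps_gcd_eq : ∀ (fuel : Nat) (a b : Int), 0 ≤ a → 0 ≤ b →
    b.natAbs ≤ fuel → nbr_of_laps_gcd fuel a b = (Int.gcd a b : Int) := by
  intro fuel
  induction fuel with
  | zero =>
    intro a b ha hb hf
    have hb0 : b = 0 := by omega
    subst hb0
    simp [nbr_of_laps_gcd, Int.gcd, Int.natAbs_of_nonneg ha]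
  | succ n ih =>
    intro a b ha hb hf
    by_cases hb0 : b = 0
    · subst hb0
      simp [nbr_of_laps_gcd, Int.gcd, Int.natAbs_of_nonneg ha]
    · have hbpos : 0 < b := lt_of_le_of_ne hb (Ne.symm hb0)
      rw [nbr_of_laps_gcd, if_neg hb0]
      have hlt : (PySem.Int.mod a b).natAbs < b.natAbs := by
        have h1 := PySem.Int.mod_nonneg (a := a) hbpos
        have h2 := PySem.Int.mod_lt (a := a) hbpos
        omega
      rw [PySem.Int.mod_eq_emod_of_pos hbpos] at hlt ⊢
      rw [ih b (a % b) hb (Int.emod_nonneg a hb0) (by omega)]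
      rw [Int.gcd_comm]
      exact congrArg _ (Int.gcd_emod a b)

-- B's 'abs(x*y) // gcd' is (the cast of) Int.lcm x y.
theorem nbr_of_laps_dom_bounds (x y : Int) (hd : Dom_nbr_of_laps x y) :
    -2147483648 ≤ x ∧ x ≤ 2147483648 ∧ -2147483648 ≤ y ∧ y ≤ 2147483648 := by
  unfold Dom_nbr_of_laps pvDomInt at hd
  simp at hd
  omega

theorem nbr_of_laps_alt_lcm (x y : Int) (hd : Dom_nbr_of_laps x y)
    (hx : x ≠ 0) (_hy : y ≠ 0) :
    PySem.Int.floordiv |x * y| (nbr_of_laps_gcd (2 ^ 63) |x| |y|) = (Int.lcm x y : Int) := by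
  have hb := nbr_of_laps_dom_bounds x y hd
  have hg : nbr_of_laps_gcd (2 ^ 63) |x| |y| = (Int.gcd x y : Int) := by
    rw [nbr_of_laps_gcd_eq (2 ^ 63) |x| |y| (abs_nonneg x) (abs_nonneg y)
      (by cases abs_cases y <;> omega)]
    simp [Int.gcd, Int.natAbs_abs]
  have hgpos : 0 < (Int.gcd x y : Int) := by
    have : Int.gcd x y ≠ 0 := by
      simp [Int.gcd_eq_zero_iff]; intro h; exact absurd h hx
    positivity
  rw [hg, PySem.Int.floordiv_eq_ediv_of_pos hgpos]
  rw [Int.abs_eq_natAbs (x * y), Int.natAbs_mul, Int.gcd]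
  rw [← Int.natCast_ediv]
  rfl

theorem nbr_of_laps_lcm_pos (x y : Int) (hx : x ≠ 0) (hy : y ≠ 0) :
    0 < (Int.lcm x y : Int) := by
  have : Int.lcm x y ≠ 0 := by
    rw [Int.lcm]; exact Nat.lcm_ne_zero (by simpa using hx) (by simpa using hy)
  positivity

theorem nbr_of_laps_lcm_dvd (x y : Int) :
    ∀ k : Int, x ∣ k → y ∣ k → (Int.lcm x y : Int) ∣ k := by
  intro k h1 h2
  exact Int.dvd_natAbs.mp (Int.natCast_dvd_natCast.mpr
    (Int.lcm_dvd (Int.dvd_natAbs.mpr h1) (Int.dvd_natAbs.mpr h2)))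

theorem nbr_of_laps_lcm_le (x y : Int) (hd : Dom_nbr_of_laps x y)
    (hx : x ≠ 0) (hy : y ≠ 0) : (Int.lcm x y : Int) ≤ 2 ^ 62 := by
  have hLle : (Int.lcm x y : Int) ≤ |x| * |y| := by
    have d1 : (Int.lcm x y : Int) ∣ x * y :=
      nbr_of_laps_lcm_dvd x y _ (dvd_mul_right x y) (dvd_mul_left y x)
    have d2 : (Int.lcm x y : Int) ∣ |x * y| := (dvd_abs _ _).mpr d1
    have := Int.le_of_dvd (abs_pos.mpr (mul_ne_zero hx hy)) d2
    rwa [abs_mul] at this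
  have hb := nbr_of_laps_dom_bounds x y hd
  have hx31 : |x| ≤ 2147483648 := by cases abs_cases x <;> omega
  have hy31 : |y| ≤ 2147483648 := by cases abs_cases y <;> omega
  calc (Int.lcm x y : Int) ≤ |x| * |y| := hLle
    _ ≤ 2147483648 * 2147483648 :=
        mul_le_mul hx31 hy31 (abs_nonneg y) (by norm_num)
    _ = 2 ^ 62 := by norm_num

-- agreement outside D_: the scan starts at a positive maior and stops exactly at the lcm
theorem nbr_of_laps_spec_aux (x y : Int) (hd : Dom_nbr_of_laps x y)
    (hx : x ≠ 0) (hy : y ≠ 0) (hnd : ¬ (x < 0 ∧ y < 0)) :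
    nbr_of_laps x y = nbr_of_laps_alt x y := by
  simp only [nbr_of_laps, nbr_of_laps_alt]
  rw [nbr_of_laps_alt_lcm x y hd hx hy]
  set L : Int := (Int.lcm x y : Int) with hL
  set m : Int := if x > y then x else y with hm
  have hL0 : 0 < L := nbr_of_laps_lcm_pos x y hx hy
  have hm0 : 0 < m := by
    rcases not_and_or.mp hnd with h | h
    · have : 0 < x := lt_of_le_of_ne (not_lt.mp h) (Ne.symm hx)
      rw [hm]; split <;> omega
    · have : 0 < y := lt_of_le_of_ne (not_lt.mp h) (Ne.symm hy)
      rw [hm]; split <;> omega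
  have hmabs : m = |x| ∨ m = |y| := by
    rw [hm]; split
    · left; rw [abs_of_pos (by omega)]
    · right; rw [abs_of_pos (by omega)]
  have hmL : m ≤ L := by
    have h1 : |x| ≤ L := Int.le_of_dvd hL0 ((abs_dvd _ _).mpr (Int.dvd_lcm_left x y))
    have h2 : |y| ≤ L := Int.le_of_dvd hL0 ((abs_dvd _ _).mpr (Int.dvd_lcm_right x y))
    rcases hmabs with h | h <;> omega
  have hmin : ∀ k, m ≤ k → k < L → ¬ (x ∣ k ∧ y ∣ k) := by
    rintro k hk1 hk2 ⟨hkx, hky⟩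
    have hLk : L ∣ k := nbr_of_laps_lcm_dvd x y k hkx hky
    have : L ≤ k := Int.le_of_dvd (by omega) hLk
    omega
  have hfuel : (L - m).toNat ≤ 2 ^ 63 := by
    have := nbr_of_laps_lcm_le x y hd hx hy
    omega
  rw [nbr_of_laps_loop_finds (2 ^ 63) x y L (Int.dvd_lcm_left x y)
    (Int.dvd_lcm_right x y) m hmL hmin hfuel]

-- inside D_ with x = y: A's scan stops at maior = x immediately
theorem nbr_of_laps_diag (x : Int) (hx : x < 0) :
    nbr_of_laps x x = [1, 1] := by
  simp only [nbr_of_laps]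
  have hm : (if x > x then x else x) = x := by simp
  have hstop : nbr_of_laps_loop (2 ^ 63) x x x = x :=
    nbr_of_laps_loop_finds (2 ^ 63) x x x dvd_rfl dvd_rfl x le_rfl
      (fun k hk1 hk2 _ => by omega) (by omega)
  rw [hm, hstop]
  have h1 : PySem.Int.floordiv x x = 1 := by
    have hid := PySem.Int.floordiv_mul_add_mod x x
    have hm0 : PySem.Int.mod x x = 0 := (PySem.Int.mod_eq_zero_iff_dvd x x).mpr dvd_rfl
    rw [hm0, add_zero] at hid
    have hx0 : x ≠ 0 := by omega
    have : PySem.Int.floordiv x x * x = 1 * x := by omega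
    exact mul_right_cancel₀ hx0 this
  rw [h1]

-- inside D_ with x ≠ y: A's scan passes 0 and stops there
theorem nbr_of_laps_offdiag (x y : Int) (hxlo : -2147483648 ≤ x)
    (hx : x < 0) (hy : y < 0) (hne : x ≠ y) :
    nbr_of_laps x y = [0, 0] := by
  simp only [nbr_of_laps]
  set m : Int := if x > y then x else y with hm
  have hm0 : m < 0 := by rw [hm]; split <;> omega
  have hmabs : -m ≤ |x| ∧ -m ≤ |y| ∧ (-m < |x| ∨ -m < |y|) := by
    rw [hm, abs_of_neg hx, abs_of_neg hy]; split <;> omega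
  have hmin : ∀ k, m ≤ k → k < 0 → ¬ (x ∣ k ∧ y ∣ k) := by
    rintro k hk1 hk2 ⟨hkx, hky⟩
    have hax : |x| ∣ k := (abs_dvd _ _).mpr hkx
    have hay : |y| ∣ k := (abs_dvd _ _).mpr hky
    have hax' : |x| ≤ -k := Int.le_of_dvd (by omega) (Dvd.dvd.neg_right hax)
    have hay' : |y| ≤ -k := Int.le_of_dvd (by omega) (Dvd.dvd.neg_right hay)
    rcases hmabs.2.2 with h | h <;> omega
  have hz : nbr_of_laps_loop (2 ^ 63) x y m = 0 := by
    apply nbr_of_laps_loop_finds (2 ^ 63) x y 0 (dvd_zero x) (dvd_zero y) m (by omega) hmin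
    have h1 : x ≤ m := by rw [hm]; split <;> omega
    omega
  rw [hz]
  simp [PySem.Int.floordiv]

-- B's first entry is negative when both inputs are negative (lcm > 0, x < 0)
theorem nbr_of_laps_alt_head_neg (x y : Int) (hx : x < 0) (hy : y < 0) :
    PySem.Int.floordiv (Int.lcm x y : Int) x < 0 := by
  have hL0 : 0 < (Int.lcm x y : Int) := nbr_of_laps_lcm_pos x y (by omega) (by omega)
  have := PySem.Int.floordiv_neg_neg (a := Int.lcm x y) (b := x)
  -- floordiv L x = -(floordiv (-L) (-x)) form is not direct; bound via the defining identity
  have hid := PySem.Int.floordiv_mul_add_mod (Int.lcm x y : Int) x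
  have hb1 := PySem.Int.mod_neg_bounds (a := (Int.lcm x y : Int)) hx
  nlinarith [hb1.1, hb1.2]

theorem nbr_of_laps_exact_aux (x y : Int) (hd : Dom_nbr_of_laps x y)
    (hx : x < 0) (hy : y < 0) : nbr_of_laps x y ≠ nbr_of_laps_alt x y := by
  have hhead : nbr_of_laps_alt x y =
      [PySem.Int.floordiv (Int.lcm x y : Int) x, PySem.Int.floordiv (Int.lcm x y : Int) y] := by
    simp only [nbr_of_laps_alt]
    rw [nbr_of_laps_alt_lcm x y hd (by omega) (by omega)]
  have hneg := nbr_of_laps_alt_head_neg x y hx hy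
  by_cases hxy : x = y
  · subst hxy
    rw [nbr_of_laps_diag x hx, hhead]
    intro h
    have := (List.cons.injEq _ _ _ _).mp h
    omega
  · have hb := nbr_of_laps_dom_bounds x y hd
    rw [nbr_of_laps_offdiag x y (by omega) hx hy hxy, hhead]
    intro h
    have := (List.cons.injEq _ _ _ _).mp h
    omega

-- ===== VERDICT (by name: the statement is the Claim_ definition above) =====
theorem nbr_of_laps_spec : Claim_unchanged_nbr_of_laps := by
  intro x y hd hpre hnd
  exact nbr_of_laps_spec_aux x y hd hpre.1 hpre.2 hnd

theorem nbr_of_laps_changed : Claim_changed_nbr_of_laps := by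
  unfold Claim_changed_nbr_of_laps
  refine ⟨by decide, by decide, by decide, ?_, ?_, by decide⟩
  · exact nbr_of_laps_offdiag (-2) (-3) (by norm_num) (by norm_num) (by norm_num) (by norm_num)
  · show nbr_of_laps_alt (-2) (-3) = [-3, -2]
    simp only [nbr_of_laps_alt]
    rw [nbr_of_laps_alt_lcm (-2) (-3) (by decide) (by norm_num) (by norm_num)]
    decide

theorem nbr_of_laps_tight : Claim_exact_nbr_of_laps := by
  intro x y hd _ hD
  exact nbr_of_laps_exact_aux x y hd hD.1 hD.2
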